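-- pv_equiv track=rewrite | github.com/kbpark9898/Algorithm_Solving | 04_Binary_Search/PG_Jinggumdari.py | is_triple_zero
-- ===== SOURCE A (Python) =====
-- def is_triple_zero(input_data, mid, bound):
--     zero_count=0
--     for i in input_data:
--         if(i<=mid):
--             zero_count+=1
--         else:
--             zero_count=0
--         if zero_count>=bound:
--             return True
--     return False
-- ===== SOURCE B (Python) =====
-- def is_triple_zero(input_data, mid, bound):
--     if bound <= 0:
--         return True
--     if bound > len(input_data):
--         return False
--     flags = ''.join('0' if x <= mid else '1' for x in input_data)
--     return '0' * bound in flags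
-- ===== Notes on version B (the rewrite author's own statement) =====
-- stated objective: alternative
-- what changed: B replaces A's incremental streak counter with a substring search: it encodes each element as '0' (<= mid) or '1', and asks whether the string '0'*bound occurs, after natural guards for bound <= 0 (vacuously true) and bound > len (impossible).
-- intended difference: On the empty list with bound <= 0, A returns False (its loop body never runs) while B returns True, because a requirement of at most zero consecutive elements is vacuously satisfied; on every other input they agree. — e.g. on is_triple_zero([], 0, 0): A returns false, B returns true
import Mathlib
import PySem

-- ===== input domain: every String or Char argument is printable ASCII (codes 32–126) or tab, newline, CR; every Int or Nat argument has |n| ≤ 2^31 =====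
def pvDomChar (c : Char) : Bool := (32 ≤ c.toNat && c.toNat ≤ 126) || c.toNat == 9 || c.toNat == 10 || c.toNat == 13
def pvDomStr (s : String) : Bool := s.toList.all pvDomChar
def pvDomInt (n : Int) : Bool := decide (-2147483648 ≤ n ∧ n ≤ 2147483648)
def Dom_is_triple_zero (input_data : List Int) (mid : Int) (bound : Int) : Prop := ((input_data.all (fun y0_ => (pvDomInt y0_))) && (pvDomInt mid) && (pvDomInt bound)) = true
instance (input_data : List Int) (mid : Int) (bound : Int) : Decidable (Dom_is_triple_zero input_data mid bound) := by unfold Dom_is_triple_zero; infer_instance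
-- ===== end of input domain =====

-- B recasts A's incremental streak counter as a substring search: encode each element as '0' (≤ mid) or '1' and ask
-- whether '0' * bound occurs, with a vacuous-truth guard for bound ≤ 0 and an impossible-run guard for bound > len;
-- same value everywhere except the empty list with bound ≤ 0 (see D_ below).

-- ===== PORT A =====
def isTZLoop (mid : Int) (bound : Int) : List Int → Int → Bool
  | [], _ => false
  | i :: rest, zero_count =>
    let zc := if i ≤ mid then zero_count + 1 else 0
    if zc ≥ bound then true else isTZLoop mid bound rest zc

def is_triple_zero (input_data : List Int) (mid : Int) (bound : Int) : Bool :=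
  isTZLoop mid bound input_data 0

-- ===== PORT B =====
def is_triple_zero_alt (input_data : List Int) (mid : Int) (bound : Int) : Bool :=
  if bound ≤ 0 then true
  else if bound > (input_data.length : Int) then false
  else
    let flags := input_data.map (fun x => if x ≤ mid then '0' else '1')
    PySem.Chars.isIn (List.replicate bound.toNat '0') flags

-- ===== PRECONDITION & SPEC =====
-- On the empty list with bound ≤ 0, A returns False (its loop body never runs) while B returns True,
-- because a requirement of at most zero consecutive elements is vacuously satisfied.
def D_is_triple_zero (input_data : List Int) (mid : Int) (bound : Int) : Prop :=
  input_data = [] ∧ bound ≤ 0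

instance (input_data : List Int) (mid : Int) (bound : Int) : Decidable (D_is_triple_zero input_data mid bound) := by
  unfold D_is_triple_zero; infer_instance

def Spec_is_triple_zero (input_data : List Int) (mid : Int) (bound : Int) (out : Bool) : Prop :=
  ¬ D_is_triple_zero input_data mid bound → out = is_triple_zero_alt input_data mid bound

instance (input_data : List Int) (mid : Int) (bound : Int) (out : Bool) : Decidable (Spec_is_triple_zero input_data mid bound out) := by
  unfold Spec_is_triple_zero; infer_instance

def pvDiffWitness_is_triple_zero : List Int × Int × Int := ([], 0, 0)
def pvDiffWitnessOut_is_triple_zero : Bool × Bool := (false, true)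

-- ===== CLAIM (what is proved, stated in full; the proofs are below) =====
def Claim_unchanged_is_triple_zero : Prop := ∀ (input_data : List Int) (mid : Int) (bound : Int), Dom_is_triple_zero input_data mid bound → Spec_is_triple_zero input_data mid bound (is_triple_zero input_data mid bound)
def Claim_changed_is_triple_zero : Prop := Dom_is_triple_zero (pvDiffWitness_is_triple_zero.1) (pvDiffWitness_is_triple_zero.2.1) (pvDiffWitness_is_triple_zero.2.2) ∧ D_is_triple_zero (pvDiffWitness_is_triple_zero.1) (pvDiffWitness_is_triple_zero.2.1) (pvDiffWitness_is_triple_zero.2.2) ∧ is_triple_zero (pvDiffWitness_is_triple_zero.1) (pvDiffWitness_is_triple_zero.2.1) (pvDiffWitness_is_triple_zero.2.2) = pvDiffWitnessOut_is_triple_zero.1 ∧ is_triple_zero_alt (pvDiffWitness_is_triple_zero.1) (pvDiffWitness_is_triple_zero.2.1) (pvDiffWitness_is_triple_zero.2.2) = pvDiffWitnessOut_is_triple_zero.2 ∧ pvDiffWitnessOut_is_triple_zero.1 ≠ pvDiffWitnessOut_is_triple_zero.2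
def Claim_exact_is_triple_zero : Prop := ∀ (input_data : List Int) (mid : Int) (bound : Int), Dom_is_triple_zero input_data mid bound → D_is_triple_zero input_data mid bound → is_triple_zero input_data mid bound ≠ is_triple_zero_alt input_data mid bound

-- ===== LEMMAS AND PROOFS =====

-- length of the maximal prefix of elements ≤ mid
def pvFrontRun (mid : Int) : List Int → Nat
  | [] => 0
  | x :: xs => if x ≤ mid then pvFrontRun mid xs + 1 else 0

-- recursive form of "some window of b consecutive elements is entirely ≤ mid"
def pvWin (mid : Int) (b : Nat) : List Int → Bool
  | [] => b == 0
  | x :: xs => decide (b ≤ pvFrontRun mid (x :: xs)) || pvWin mid b xs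

lemma pvFrontRun_iff (mid : Int) (xs : List Int) (b : Nat) :
    (b ≤ xs.length ∧ ∀ y ∈ xs.take b, y ≤ mid) ↔ b ≤ pvFrontRun mid xs := by
  induction xs generalizing b with
  | nil => simp [pvFrontRun]
  | cons x xs ih =>
    cases b with
    | zero => simp
    | succ n =>
      simp only [pvFrontRun, List.length_cons, List.take_succ_cons, List.mem_cons]
      by_cases hx : x ≤ mid
      · simp only [hx, if_true]
        constructor
        · rintro ⟨hlen, hall⟩
          have := (ih n).mp ⟨by omega, fun y hy => hall y (Or.inr hy)⟩
          omega
        · intro h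
          have := (ih n).mpr (by omega)
          exact ⟨by omega, fun y hy => by rcases hy with rfl | hy; exact hx; exact this.2 y hy⟩
      · simp only [hx, if_false]
        constructor
        · rintro ⟨_, hall⟩; exact absurd (hall x (Or.inl rfl)) hx
        · omega

lemma pvWin_iff (mid : Int) (b : Nat) (xs : List Int) :
    pvWin mid b xs = true ↔ ∃ i : Nat, i + b ≤ xs.length ∧ ∀ y ∈ (xs.drop i).take b, y ≤ mid := by
  induction xs with
  | nil =>
    simp only [pvWin, beq_iff_eq, List.drop_nil, List.take_nil, List.not_mem_nil,
      false_implies, implies_true, and_true, List.length_nil]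
    constructor
    · rintro rfl; exact ⟨0, by omega⟩
    · rintro ⟨i, hi⟩; omega
  | cons x xs ih =>
    simp only [pvWin, Bool.or_eq_true, decide_eq_true_eq, ih]
    constructor
    · rintro (h | ⟨i, hi, hall⟩)
      · obtain ⟨hlen, hall⟩ := (pvFrontRun_iff mid (x :: xs) b).mpr h
        exact ⟨0, by simpa using hlen, by simpa using hall⟩
      · exact ⟨i + 1, by simp; omega, by simpa using hall⟩
    · rintro ⟨i, hi, hall⟩
      cases i with
      | zero =>
        exact Or.inl ((pvFrontRun_iff mid (x :: xs) b).mp ⟨by simpa using hi, by simpa using hall⟩)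
      | succ j =>
        exact Or.inr ⟨j, by simp at hi; omega, by simpa using hall⟩

lemma pvFrontRun_pvWin (mid : Int) (b : Nat) (xs : List Int) (h1 : 1 ≤ b)
    (h2 : b ≤ pvFrontRun mid xs) : pvWin mid b xs = true := by
  cases xs with
  | nil => simp [pvFrontRun] at h2; omega
  | cons x xs => simp only [pvWin, Bool.or_eq_true, decide_eq_true_eq]; exact Or.inl h2

lemma isTZLoop_iff (mid bound : Int) (hb : 1 ≤ bound) (xs : List Int) :
    ∀ zc : Int, 0 ≤ zc →
      (isTZLoop mid bound xs zc = true ↔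
        (1 ≤ pvFrontRun mid xs ∧ bound ≤ zc + pvFrontRun mid xs) ∨
          pvWin mid bound.toNat xs = true) := by
  induction xs with
  | nil =>
    intro zc _
    simp [isTZLoop, pvFrontRun, pvWin]
    omega
  | cons x xs ih =>
    intro zc hzc
    simp only [isTZLoop]
    by_cases hx : x ≤ mid
    · simp only [hx, if_true, pvFrontRun, pvWin, Bool.or_eq_true, decide_eq_true_eq]
      by_cases hge : zc + 1 ≥ bound
      · simp only [hge, if_true]
        constructor
        · intro _; exact Or.inl ⟨by omega, by omega⟩
        · intro _; trivial
      · simp only [hge, if_false]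
        rw [ih (zc + 1) (by omega)]
        constructor
        · rintro (⟨h1, h2⟩ | h)
          · exact Or.inl ⟨by omega, by omega⟩
          · exact Or.inr (Or.inr h)
        · rintro (⟨_, h2⟩ | h | h)
          · have hfr : 1 ≤ pvFrontRun mid xs := by omega
            exact Or.inl ⟨hfr, by omega⟩
          · -- bound.toNat ≤ pvFrontRun mid xs + 1
            have h2 : bound ≤ (pvFrontRun mid xs : Int) + 1 := by omega
            by_cases hfr : 1 ≤ pvFrontRun mid xs
            · exact Or.inl ⟨hfr, by omega⟩
            · omega
          · exact Or.inr h
    · simp only [hx, if_false, pvFrontRun, pvWin, Bool.or_eq_true, decide_eq_true_eq]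
      have hge : ¬ ((0 : Int) ≥ bound) := by omega
      simp only [hge, if_false]
      rw [ih 0 le_rfl]
      constructor
      · rintro (⟨h1, h2⟩ | h)
        · exact Or.inr (Or.inr (pvFrontRun_pvWin mid bound.toNat xs (by omega) (by omega)))
        · exact Or.inr (Or.inr h)
      · rintro (⟨h1, _⟩ | h | h)
        · omega
        · omega
        · exact Or.inr h

lemma alt_iff (mid bound : Int) (hb : 1 ≤ bound) (xs : List Int) :
    is_triple_zero_alt xs mid bound = true ↔ pvWin mid bound.toNat xs = true := by
  have hb0 : ¬ bound ≤ 0 := by omega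
  rw [pvWin_iff]
  simp only [is_triple_zero_alt, hb0, if_false]
  by_cases hlen : bound > (xs.length : Int)
  · simp only [hlen, if_true]
    constructor
    · intro h; cases h
    · rintro ⟨i, hi, _⟩; omega
  · simp only [hlen, if_false]
    rw [PySem.Chars.isIn_iff_infix]
    constructor
    · rintro ⟨s, t, hst⟩
      refine ⟨s.length, ?_, ?_⟩
      · have := congrArg List.length hst
        simp [List.length_append] at this
        omega
      · have h1 : ((xs.map (fun x => if x ≤ mid then '0' else '1')).drop s.length).take bound.toNat
            = List.replicate bound.toNat '0' := by
          rw [← hst, List.append_assoc, List.drop_left,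
            List.take_left' (by simp : (List.replicate bound.toNat '0').length = bound.toNat)]
        rw [← List.map_drop, ← List.map_take, List.eq_replicate_iff] at h1
        intro y hy
        have := h1.2 _ (List.mem_map_of_mem hy)
        by_contra hmy
        simp [hmy] at this
    · rintro ⟨i, hi, hall⟩
      set flags := xs.map (fun x => if x ≤ mid then '0' else '1') with hflags
      refine ⟨flags.take i, flags.drop (i + bound.toNat), ?_⟩
      have h1 : (flags.drop i).take bound.toNat = List.replicate bound.toNat '0' := by
        rw [hflags, ← List.map_drop, ← List.map_take, List.eq_replicate_iff]
        constructor
        · simp; omega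
        · intro c hc
          obtain ⟨y, hy, rfl⟩ := List.mem_map.mp hc
          simp [hall y hy]
      calc flags.take i ++ List.replicate bound.toNat '0' ++ flags.drop (i + bound.toNat)
          = flags.take i ++ ((flags.drop i).take bound.toNat ++ (flags.drop i).drop bound.toNat) := by
            rw [h1, List.append_assoc, List.drop_drop]
        _ = flags := by rw [List.take_append_drop, List.take_append_drop]


-- ===== VERDICT (by name: the statement is the Claim_ definition above) =====
theorem is_triple_zero_spec : Claim_unchanged_is_triple_zero := by
  intro xs mid bound _
  unfold Spec_is_triple_zero
  intro hD
  by_cases hb : bound ≤ 0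
  · cases xs with
    | nil => exact absurd ⟨rfl, hb⟩ hD
    | cons x rest =>
      have hA : is_triple_zero (x :: rest) mid bound = true := by
        simp only [is_triple_zero, isTZLoop]
        split <;> first | rfl | rw [if_pos (by omega)]
      rw [hA]
      simp [is_triple_zero_alt, hb]
  · have hb1 : 1 ≤ bound := by omega
    have hA := isTZLoop_iff mid bound hb1 xs 0 le_rfl
    have hB := alt_iff mid bound hb1 xs
    have key : is_triple_zero xs mid bound = true ↔ is_triple_zero_alt xs mid bound = true := by
      rw [show is_triple_zero xs mid bound = isTZLoop mid bound xs 0 from rfl, hA, hB]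
      constructor
      · rintro (⟨h1, h2⟩ | h)
        · exact pvFrontRun_pvWin mid bound.toNat xs (by omega) (by omega)
        · exact h
      · exact Or.inr
    cases h1 : is_triple_zero xs mid bound <;> cases h2 : is_triple_zero_alt xs mid bound <;>
      simp_all

theorem is_triple_zero_changed : Claim_changed_is_triple_zero := by
  unfold Claim_changed_is_triple_zero; decide

theorem is_triple_zero_tight : Claim_exact_is_triple_zero := by
  intro xs mid bound _ hD
  obtain ⟨rfl, hb⟩ := hD
  simp [is_triple_zero, is_triple_zero_alt, isTZLoop, hb]
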